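-- pv_equiv track=rewrite | github.com/mramalingam2203/geeks-for-geeks-go | workbench/arrays.py | subarrayOfGivenSizeAndSum
-- ===== SOURCE A (Python) =====
-- from functools import reduce
-- import operator
--
-- def subarrayOfGivenSizeAndSum(a, size, sum):
-- 	n = len(a)
-- 	for i in range(n):
-- 		for j in range(i,n):
-- 			subarray = []
-- 			for k in range(i, j+1):
-- 				subarray.append(a[k])
-- 			if len(subarray) == size and reduce(operator.add, subarray) == sum:
-- 				return True
--
-- 	return False
-- ===== SOURCE B (Python) =====
-- def subarrayOfGivenSizeAndSum(a, size, sum):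
--     n = len(a)
--     if size < 1 or size > n:
--         return False
--     s = 0
--     for x in a[:size]:
--         s += x
--     if s == sum:
--         return True
--     for x, y in zip(a[size:], a):
--         s += x - y
--         if s == sum:
--             return True
--     return False
-- ===== Notes on version B (the rewrite author's own statement) =====
-- stated objective: faster
-- what changed: Replaced the triple nested loop that materialises every contiguous subarray with a fixed-size sliding-window running sum (size<1 or size>n rejected up front).
import Mathlib
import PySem

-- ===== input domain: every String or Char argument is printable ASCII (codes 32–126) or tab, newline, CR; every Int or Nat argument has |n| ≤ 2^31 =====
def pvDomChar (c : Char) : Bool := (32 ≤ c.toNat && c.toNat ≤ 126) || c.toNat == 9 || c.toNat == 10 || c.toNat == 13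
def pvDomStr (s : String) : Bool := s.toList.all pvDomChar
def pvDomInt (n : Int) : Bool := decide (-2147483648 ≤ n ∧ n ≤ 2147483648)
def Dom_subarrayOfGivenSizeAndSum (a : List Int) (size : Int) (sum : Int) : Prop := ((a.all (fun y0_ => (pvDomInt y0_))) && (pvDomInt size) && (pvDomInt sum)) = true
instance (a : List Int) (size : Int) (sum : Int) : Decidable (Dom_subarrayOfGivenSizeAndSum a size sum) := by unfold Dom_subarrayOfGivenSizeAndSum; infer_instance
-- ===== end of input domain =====

-- B replaces A's triple nested loop (enumerating every contiguous subarray and summing it afresh) with a fixed-size sliding-window running sum; equivalence is proved on all inputs.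


-- ===== PORT A =====
-- functools.reduce(operator.add, l): the first element is the initial accumulator.
-- A only applies it to nonempty lists (the k-loop from i to j ≥ i appends at least one
-- element), so the [] case — where Python would raise TypeError — is unreachable.
def pyReduceAdd : List Int → Int
  | [] => 0
  | x :: xs => xs.foldl (· + ·) x

def subarrayOfGivenSizeAndSum (a : List Int) (size : Int) (sum : Int) : Bool :=
  let n : Int := a.length
  (PySem.List.pyRange 0 n 1).any (fun i =>
    (PySem.List.pyRange i n 1).any (fun j =>
      let subarray := (PySem.List.pyRange i (j + 1) 1).foldl
        (fun acc k => acc ++ [PySem.List.pyGetD a k 0]) []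
      decide ((subarray.length : Int) = size) && decide (pyReduceAdd subarray = sum)))

-- ===== PORT B =====
-- sliding loop: for each pair (a[i], a[i-size]) update the running window sum and test it
def pvSlide (pairs : List (Int × Int)) (s : Int) (target : Int) : Bool :=
  match pairs with
  | [] => false
  | (x, y) :: rest =>
    let s' := s + x - y
    if s' = target then true else pvSlide rest s' target

def subarrayOfGivenSizeAndSum_alt (a : List Int) (size : Int) (sum : Int) : Bool :=
  let n : Int := a.length
  if size < 1 || n < size then false
  else
    let k := size.toNat
    let s := (a.take k).foldl (· + ·) 0
    if s = sum then true else pvSlide ((a.drop k).zip a) s sum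

-- ===== PRECONDITION & SPEC =====
def Spec_subarrayOfGivenSizeAndSum (a : List Int) (size : Int) (sum : Int) (out : Bool) : Prop := out = subarrayOfGivenSizeAndSum_alt a size sum
instance (a : List Int) (size : Int) (sum : Int) (out : Bool) : Decidable (Spec_subarrayOfGivenSizeAndSum a size sum out) := by unfold Spec_subarrayOfGivenSizeAndSum; infer_instance

-- ===== CLAIM (what is proved, stated in full; the proofs are below) =====
def Claim_equal_subarrayOfGivenSizeAndSum : Prop := ∀ (a : List Int) (size : Int) (sum : Int), Dom_subarrayOfGivenSizeAndSum a size sum → Spec_subarrayOfGivenSizeAndSum a size sum (subarrayOfGivenSizeAndSum a size sum)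

-- ===== LEMMAS AND PROOFS =====

-- sum of the window of length k starting at index i
def wsum (a : List Int) (i k : Nat) : Int := ((a.drop i).take k).foldl (· + ·) 0

-- "some contiguous window of length exactly `size` sums to `sum`" — both ports decide this
def ExWin (a : List Int) (size : Int) (sum : Int) : Prop :=
  ∃ i k : Nat, 1 ≤ k ∧ i + k ≤ a.length ∧ (k : Int) = size ∧ wsum a i k = sum

lemma pyReduceAdd_eq_foldl (l : List Int) : pyReduceAdd l = l.foldl (· + ·) 0 := by
  cases l with
  | nil => rfl
  | cons x xs => simp [pyReduceAdd, List.foldl]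

lemma subarr_eq (a : List Int) (i j : Nat) (hij : i ≤ j) (hj : j < a.length) :
    (PySem.List.pyRange (i : Int) ((j : Int) + 1) 1).foldl
      (fun acc k => acc ++ [PySem.List.pyGetD a k 0]) []
    = (a.drop i).take (j + 1 - i) := by
  rw [PySem.List.foldl_append_singleton_eq_map, List.nil_append, PySem.List.pyRange_one]
  have hm : (((j : Int) + 1) - (i : Int)).toNat = j + 1 - i := by omega
  rw [hm]
  apply List.ext_getElem
  · simp; omega
  · intro t h1 h2
    simp only [List.getElem_map, List.getElem_range, List.getElem_take, List.getElem_drop]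
    have ht : t < j + 1 - i := by simpa using h1
    have hcast : ((i : Int) + (t : Int)) = ((i + t : Nat) : Int) := by push_cast; ring
    rw [hcast, PySem.List.pyGetD_natCast]
    have hlt : i + t < a.length := by omega
    simp [hlt]

lemma wsum_eq_sum (a : List Int) (i k : Nat) : wsum a i k = ((a.drop i).take k).sum := by
  unfold wsum
  induction ((a.drop i).take k) using List.reverseRecOn with
  | nil => rfl
  | append_singleton l x ih => simp [List.foldl_append, List.sum_append, ih]

lemma wsum_shift (a : List Int) (i k : Nat) (h : i + k < a.length) :
    wsum a (i + 1) k = wsum a i k + a[i + k]'h - a[i]'(by omega) := by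
  have hi : i < a.length := by omega
  have hd : a.drop i = a[i] :: a.drop (i + 1) := List.drop_eq_getElem_cons hi
  have e1 : (a.drop i).take (k + 1) = a[i] :: (a.drop (i + 1)).take k := by rw [hd]; rfl
  have e2 : (a.drop i).take (k + 1) = (a.drop i).take k ++ [a[i + k]'h] := by
    rw [List.take_add_one]
    congr 1
    have hg : (a.drop i)[k]? = some (a[i + k]'h) := by
      rw [List.getElem?_drop]
      exact List.getElem?_eq_getElem h
    simp [hg]
  have := congrArg List.sum (e1.symm.trans e2)
  simp [List.sum_append] at this
  rw [wsum_eq_sum, wsum_eq_sum]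
  omega

lemma slide_iff (a : List Int) (k : Nat) (target : Int) :
    ∀ i, i + k ≤ a.length →
      (pvSlide ((a.drop (i + k)).zip (a.drop i)) (wsum a i k) target = true
        ↔ ∃ j : Nat, i < j ∧ j + k ≤ a.length ∧ wsum a j k = target) := by
  intro i hi
  generalize hm : a.length - (i + k) = m
  induction m generalizing i with
  | zero =>
    have hnil : a.drop (i + k) = [] := List.drop_eq_nil_of_le (by omega)
    rw [hnil]
    simp only [List.zip_nil_left, pvSlide]
    constructor
    · intro h; exact absurd h (by simp)
    · rintro ⟨j, h1, h2, _⟩; omega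
  | succ m ih =>
    have hik : i + k < a.length := by omega
    have hd1 : a.drop (i + k) = a[i + k] :: a.drop (i + k + 1) := List.drop_eq_getElem_cons hik
    have hd2 : a.drop i = a[i]'(by omega) :: a.drop (i + 1) := List.drop_eq_getElem_cons (by omega)
    rw [hd1, hd2]
    simp only [List.zip_cons_cons, pvSlide]
    have hs : wsum a i k + a[i + k] - a[i]'(by omega) = wsum a (i + 1) k :=
      (wsum_shift a i k hik).symm
    rw [hs]
    have hre : i + k + 1 = (i + 1) + k := by omega
    by_cases hc : wsum a (i + 1) k = target
    · rw [if_pos hc]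
      simp only [true_iff]
      exact ⟨i + 1, by omega, by omega, hc⟩
    · rw [if_neg hc, hre, ih (i + 1) (by omega) (by omega)]
      constructor
      · rintro ⟨j, h1, h2, h3⟩; exact ⟨j, by omega, h2, h3⟩
      · rintro ⟨j, h1, h2, h3⟩
        rcases Nat.lt_or_ge (i + 1) j with h | h
        · exact ⟨j, h, h2, h3⟩
        · have hj : j = i + 1 := by omega
          rw [hj] at h3; exact absurd h3 hc

lemma A_iff (a : List Int) (size sum : Int) :
    subarrayOfGivenSizeAndSum a size sum = true ↔ ExWin a size sum := by
  unfold subarrayOfGivenSizeAndSum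
  simp only [List.any_eq_true, Bool.and_eq_true, decide_eq_true_eq, PySem.List.mem_pyRange_one]
  constructor
  · rintro ⟨i, ⟨hi0, hin⟩, j, ⟨hij, hjn⟩, hlen, hsum⟩
    obtain ⟨I, rfl⟩ : ∃ I : Nat, (I : Int) = i := ⟨i.toNat, Int.toNat_of_nonneg hi0⟩
    obtain ⟨J, rfl⟩ : ∃ J : Nat, (J : Int) = j := ⟨j.toNat, Int.toNat_of_nonneg (le_trans hi0 hij)⟩
    have hIJ : I ≤ J := by exact_mod_cast hij
    have hJn : J < a.length := by exact_mod_cast hjn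
    rw [subarr_eq a I J hIJ hJn] at hlen hsum
    have hl : ((a.drop I).take (J + 1 - I)).length = J + 1 - I := by
      simp [List.length_take, List.length_drop]; omega
    rw [hl] at hlen
    rw [pyReduceAdd_eq_foldl] at hsum
    exact ⟨I, J + 1 - I, by omega, by omega, hlen, hsum⟩
  · rintro ⟨I, k, hk1, hkn, hks, hws⟩
    refine ⟨(I : Int), ⟨by exact_mod_cast Int.natCast_nonneg I, by exact_mod_cast (by omega : I < a.length)⟩,
      ((I + k - 1 : Nat) : Int), ⟨by exact_mod_cast (by omega : I ≤ I + k - 1), by exact_mod_cast (by omega : I + k - 1 < a.length)⟩, ?_, ?_⟩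
    all_goals
      rw [subarr_eq a I (I + k - 1) (by omega) (by omega),
        (by omega : I + k - 1 + 1 - I = k)]
    · have hl : ((a.drop I).take k).length = k := by
        simp [List.length_take, List.length_drop]; omega
      rw [hl]; exact hks
    · rw [pyReduceAdd_eq_foldl]; exact hws

lemma B_iff (a : List Int) (size sum : Int) :
    subarrayOfGivenSizeAndSum_alt a size sum = true ↔ ExWin a size sum := by
  unfold subarrayOfGivenSizeAndSum_alt
  by_cases hbad : size < 1 ∨ (a.length : Int) < size
  · rw [if_pos (by simpa [Bool.or_eq_true, decide_eq_true_eq] using hbad)]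
    simp only [Bool.false_eq_true, false_iff]
    rintro ⟨i, k, hk1, hkn, hks, -⟩
    rcases hbad with h | h
    · omega
    · have : (k : Int) ≤ (a.length : Int) := by exact_mod_cast (by omega : k ≤ a.length)
      omega
  · push Not at hbad
    obtain ⟨hs1, hsn⟩ := hbad
    rw [if_neg (by simp only [Bool.or_eq_true, decide_eq_true_eq]; omega)]
    have hk0 : (size.toNat : Int) = size := Int.toNat_of_nonneg (by omega)
    have hkn : size.toNat ≤ a.length := by omega
    have hk1 : 1 ≤ size.toNat := by omega
    show (if (a.take size.toNat).foldl (· + ·) 0 = sum then true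
        else pvSlide ((a.drop size.toNat).zip a) ((a.take size.toNat).foldl (· + ·) 0) sum) = true
      ↔ ExWin a size sum
    have hw0 : (a.take size.toNat).foldl (· + ·) 0 = wsum a 0 size.toNat := by
      simp [wsum]
    rw [hw0]
    by_cases hc : wsum a 0 size.toNat = sum
    · rw [if_pos hc]
      simp only [true_iff]
      exact ⟨0, size.toNat, hk1, by omega, hk0, hc⟩
    · rw [if_neg hc]
      have hz : (a.drop size.toNat).zip a = (a.drop (0 + size.toNat)).zip (a.drop 0) := by
        simp
      rw [hz, slide_iff a size.toNat sum 0 (by omega)]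
      constructor
      · rintro ⟨j, -, h2, h3⟩
        exact ⟨j, size.toNat, hk1, h2, hk0, h3⟩
      · rintro ⟨i, k, hk1', hkn', hks', hws'⟩
        have hkk : k = size.toNat := by omega
        subst hkk
        rcases Nat.eq_zero_or_pos i with hi0 | hip
        · subst hi0; exact absurd hws' hc
        · exact ⟨i, hip, hkn', hws'⟩

-- ===== VERDICT (by name: the statement is the Claim_ definition above) =====
theorem subarrayOfGivenSizeAndSum_spec : Claim_equal_subarrayOfGivenSizeAndSum := by
  intro a size sum _
  unfold Spec_subarrayOfGivenSizeAndSum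
  exact Bool.eq_iff_iff.mpr ((A_iff a size sum).trans (B_iff a size sum).symm)
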